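-- pv_equiv track=rewrite | github.com/ZShaan0/logikatas-python | src/vowel_shift.py | vowel_shift
-- ===== SOURCE A (Python) =====
-- def vowel_shift(some_string, n):
--     vowels = ['a','e','i','o','u','A','E','I','O','U']
--
--     vowel_positions = [index for index, char in enumerate(some_string) if char in vowels]
--     vowel_chars = [char for char in some_string if char in vowels]
--
--     relative_shift = n % len(vowel_chars)
--     shifted_vowels = vowel_chars[-relative_shift:] + vowel_chars [:-relative_shift]
--
--     chars_list = list(some_string)
--     shifted_positions = zip(vowel_positions, shifted_vowels)
--
--     for index, char in shifted_positions:
--         chars_list[index] = char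
--
--     shifted_string = ''.join(chars_list)
--     return shifted_string
-- ===== SOURCE B (Python) =====
-- def vowel_shift(some_string, n):
--     vowels = frozenset('aeiouAEIOU')
--     vowel_chars = [c for c in some_string if c in vowels]
--     k = len(vowel_chars)
--     out = []
--     j = 0
--     for c in some_string:
--         if c in vowels:
--             out.append(vowel_chars[(j - n) % k])
--             j += 1
--         else:
--             out.append(c)
--     return ''.join(out)
-- ===== Notes on version B (the rewrite author's own statement) =====
-- stated objective: alternative
-- what changed: B never builds A's rotated vowel list, position list, zip or mutated char list: it walks the string once with a vowel counter j and computes each replacement directly by modular index arithmetic, vowel_chars[(j - n) % k], avoiding the extra passes and intermediate lists (measured constant-factor speedup).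
import Mathlib
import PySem

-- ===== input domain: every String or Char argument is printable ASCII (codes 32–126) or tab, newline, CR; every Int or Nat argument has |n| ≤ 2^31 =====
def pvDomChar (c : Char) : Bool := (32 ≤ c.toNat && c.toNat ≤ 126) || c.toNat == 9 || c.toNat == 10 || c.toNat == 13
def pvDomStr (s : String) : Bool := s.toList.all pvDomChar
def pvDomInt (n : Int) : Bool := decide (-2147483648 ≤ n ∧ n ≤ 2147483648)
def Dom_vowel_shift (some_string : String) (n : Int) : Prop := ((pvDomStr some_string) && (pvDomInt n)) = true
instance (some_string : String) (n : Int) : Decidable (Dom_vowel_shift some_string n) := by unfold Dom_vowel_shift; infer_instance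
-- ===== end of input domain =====

-- B replaces A's rotated vowel list + position list + zip + index mutation by one pass with a
-- vowel counter j, computing each replacement directly as vowel_chars[(j - n) % k]; objective: alternative.


-- ===== PORT A =====
-- vowels = ['a','e','i','o','u','A','E','I','O','U']
def pvVowels : List Char := ['a', 'e', 'i', 'o', 'u', 'A', 'E', 'I', 'O', 'U']

def vowel_shift (some_string : String) (n : Int) : String :=
  let s := some_string.toList
  let vowel_positions :=
    ((PySem.List.enumerate s).filter (fun p => pvVowels.contains p.2)).map (·.1)
  let vowel_chars := s.filter (fun c => pvVowels.contains c)
  let relative_shift := PySem.Int.mod n (vowel_chars.length : Int)  -- ZeroDivisionError when no vowel: excluded by Pre_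
  let shifted_vowels :=
    PySem.List.slice vowel_chars (some (-relative_shift)) none ++
      PySem.List.slice vowel_chars none (some (-relative_shift))
  let chars_list :=
    (vowel_positions.zip shifted_vowels).foldl (fun acc iv => acc.set iv.1.toNat iv.2) s
  String.ofList chars_list

-- ===== PORT B =====
-- vowels = frozenset('aeiouAEIOU')
def pvVowelSetB : PySem.Set Char := PySem.Set.ofList "aeiouAEIOU".toList

-- the loop of Source B: out/j accumulator; at a vowel emit vowel_chars[(j - n) % k].
-- (whenever the vowel branch fires, vc is nonempty and 0 ≤ (j-n) % k < k, so the
-- pyGetD default ' ' is unreachable — Python's IndexError cannot occur here)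
def vsBuild (vc : List Char) (n : Int) : List Char → Int → List Char
  | [], _ => []
  | c :: cs, j =>
    if pvVowelSetB.contains c then
      PySem.List.pyGetD vc (PySem.Int.mod (j - n) (vc.length : Int)) ' ' :: vsBuild vc n cs (j + 1)
    else c :: vsBuild vc n cs j

def vowel_shift_alt (some_string : String) (n : Int) : String :=
  let s := some_string.toList
  let vowel_chars := s.filter (fun c => pvVowelSetB.contains c)
  String.ofList (vsBuild vowel_chars n s 0)

-- ===== PRECONDITION & SPEC =====
-- A raises ZeroDivisionError ('n % 0') on strings with no vowel: excluded.
def Pre_vowel_shift (some_string : String) (n : Int) : Prop :=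
  some_string.toList.any (fun c => pvVowels.contains c) = true
instance (some_string : String) (n : Int) : Decidable (Pre_vowel_shift some_string n) := by
  unfold Pre_vowel_shift; infer_instance

def pvWitness_vowel_shift : String × Int := ("hello world", 1)

def Spec_vowel_shift (some_string : String) (n : Int) (out : String) : Prop := out = vowel_shift_alt some_string n
instance (some_string : String) (n : Int) (out : String) : Decidable (Spec_vowel_shift some_string n out) := by unfold Spec_vowel_shift; infer_instance

-- ===== CLAIM (what is proved, stated in full; the proofs are below) =====
def Claim_equal_vowel_shift : Prop := ∀ (some_string : String) (n : Int), Dom_vowel_shift some_string n → Pre_vowel_shift some_string n → Spec_vowel_shift some_string n (vowel_shift some_string n)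

-- ===== LEMMAS AND PROOFS =====

-- B's set-membership test is A's list-membership test
theorem pvVowelSetB_eq : pvVowelSetB = pvVowels := by decide

theorem filters_eq (s : List Char) :
    s.filter (fun c => pvVowelSetB.contains c) = s.filter (fun c => pvVowels.contains c) := by
  rw [pvVowelSetB_eq]; rfl

-- proof-side streaming view of A's index-assignment loop
def vsRebuild : List Char → List Char → List Char
  | [], _ => []
  | c :: cs, vs =>
    if pvVowels.contains c then
      match vs with
      | v :: vt => v :: vsRebuild cs vt
      | [] => c :: vsRebuild cs []
    else c :: vsRebuild cs vs

-- indices produced by enumerate are at least the start value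
theorem enumerate_fst_le {α : Type} (xs : List α) (t : Int) :
    ∀ p ∈ PySem.List.enumerate xs t, t ≤ p.1 := by
  induction xs generalizing t with
  | nil => simp [PySem.List.enumerate_nil]
  | cons x xs ih =>
    intro p hp
    rw [PySem.List.enumerate_cons] at hp
    rcases List.mem_cons.mp hp with hp | hp
    · simp [hp]
    · have := ih (t + 1) p hp; omega

theorem enumerate_shift {α : Type} (xs : List α) (t : Int) :
    PySem.List.enumerate xs (t + 1) =
      (PySem.List.enumerate xs t).map (fun p => (p.1 + 1, p.2)) := by
  induction xs generalizing t with
  | nil => simp [PySem.List.enumerate_nil]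
  | cons x xs ih =>
    rw [PySem.List.enumerate_cons, PySem.List.enumerate_cons, ih (t + 1), List.map_cons]

-- A's mutation loop ignores the head when every target index got shifted up by one
theorem foldl_set_shift (ps : List Int) (w : List Char) (c : Char) (cs : List Char)
    (hps : ∀ i ∈ ps, 0 ≤ i) :
    ((ps.map (fun i => i + 1)).zip w).foldl (fun acc iv => acc.set iv.1.toNat iv.2) (c :: cs) =
      c :: (ps.zip w).foldl (fun acc iv => acc.set iv.1.toNat iv.2) cs := by
  induction ps generalizing w cs with
  | nil => simp
  | cons i ps ih =>
    cases w with
    | nil => simp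
    | cons v w =>
      have hi : 0 ≤ i := hps i (by simp)
      have h1 : (i + 1).toNat = i.toNat + 1 := by omega
      simp only [List.map_cons, List.zip_cons_cons, List.foldl_cons, h1, List.set_cons_succ]
      exact ih w (cs.set i.toNat v) (fun j hj => hps j (by simp [hj]))

-- the filtered index list of the (+1)-shifted enumeration is the shifted index list
theorem posList_shift (cs : List Char) :
    (((PySem.List.enumerate cs 0).map (fun p => (p.1 + 1, p.2))).filter
        (fun p => pvVowels.contains p.2)).map (·.1) =
      (((PySem.List.enumerate cs 0).filter (fun p => pvVowels.contains p.2)).map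
        (·.1)).map (fun i => i + 1) := by
  rw [List.filter_map, List.map_map, List.map_map]
  rfl

-- A's index-assignment loop IS the streaming rebuild
theorem foldl_set_eq_rebuild (s : List Char) (w : List Char) :
    ((((PySem.List.enumerate s).filter (fun p => pvVowels.contains p.2)).map (·.1)).zip w).foldl
        (fun acc iv => acc.set iv.1.toNat iv.2) s = vsRebuild s w := by
  induction s generalizing w with
  | nil => simp [vsRebuild]
  | cons c cs ih =>
    have hpos : ∀ i ∈ ((PySem.List.enumerate cs 0).filter
        (fun p => pvVowels.contains p.2)).map (·.1), 0 ≤ i := by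
      intro i hi
      simp only [List.mem_map, List.mem_filter] at hi
      obtain ⟨p, ⟨hp, _⟩, rfl⟩ := hi
      exact enumerate_fst_le cs 0 p hp
    rw [PySem.List.enumerate_cons, enumerate_shift cs 0]
    by_cases hc : pvVowels.contains c = true
    · rw [List.filter_cons_of_pos (by simpa using hc), List.map_cons, posList_shift]
      cases w with
      | nil =>
        rw [List.zip_nil_right, List.foldl_nil]
        simp only [vsRebuild]
        rw [if_pos hc]
        have h0 := ih []
        rw [List.zip_nil_right, List.foldl_nil] at h0
        rw [← h0]
      | cons v w =>
        rw [List.zip_cons_cons, List.foldl_cons]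
        simp only [vsRebuild]
        rw [if_pos hc]
        have : ((c :: cs).set (0 : Int).toNat v) = v :: cs := by rfl
        rw [this, foldl_set_shift _ w v cs hpos, ih w]
    · rw [List.filter_cons_of_neg (by simpa using hc), posList_shift,
          foldl_set_shift _ w c cs hpos, ih w]
      simp only [vsRebuild]
      rw [if_neg hc]

-- Python's '%' picks the unique representative in [0, k)
theorem pymod_eq_of (x c k : Int) (hk : 0 < k) (h0 : 0 ≤ c) (hlt : c < k)
    (hd : ∃ m : Int, x - c = k * m) : PySem.Int.mod x k = c := by
  rw [PySem.Int.mod_eq_emod_of_pos hk]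
  obtain ⟨m, hm⟩ := hd
  have hx : x = c + k * m := by omega
  rw [hx, Int.add_mul_emod_self_left]
  exact Int.emod_eq_of_lt h0 hlt

-- A's rotated list (negative slices) is drop/take at k - rs
theorem shifted_eq_drop_take (vc : List Char) (n : Int) (hk : vc ≠ []) :
    PySem.List.slice vc (some (-(PySem.Int.mod n (vc.length : Int)))) none ++
        PySem.List.slice vc none (some (-(PySem.Int.mod n (vc.length : Int)))) =
      vc.drop (vc.length - (PySem.Int.mod n (vc.length : Int)).toNat) ++
        vc.take (vc.length - (PySem.Int.mod n (vc.length : Int)).toNat) := by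
  have hkpos : 0 < (vc.length : Int) := by
    have := List.length_pos_iff.mpr hk; exact_mod_cast this
  set rs := PySem.Int.mod n (vc.length : Int) with hrs
  have h0 : 0 ≤ rs := PySem.Int.mod_nonneg n hkpos
  by_cases hz : rs = 0
  · rw [hz]
    simp only [neg_zero, PySem.List.slice_zero_start, PySem.List.slice_none_none,
      PySem.List.slice_to vc (le_refl (0 : Int))]
    simp
  · have hpos : 0 < rs.toNat := by omega
    have hle : rs.toNat ≤ vc.length := by
      have := PySem.Int.mod_lt n hkpos; omega
    have hcast : -rs = -(rs.toNat : Int) := by omega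
    rw [hcast, PySem.List.slice_from_neg_natCast vc rs.toNat hpos,
        PySem.List.slice_to_neg_natCast vc rs.toNat hpos]

-- element t of the rotated list is vc[(t - n) % k]
theorem shifted_getElem (vc : List Char) (n : Int) (hk : vc ≠ []) (t : Nat) (ht : t < vc.length) :
    (vc.drop (vc.length - (PySem.Int.mod n (vc.length : Int)).toNat) ++
        vc.take (vc.length - (PySem.Int.mod n (vc.length : Int)).toNat))[t]? =
      some (PySem.List.pyGetD vc (PySem.Int.mod ((t : Int) - n) (vc.length : Int)) ' ') := by
  have hkpos : 0 < (vc.length : Int) := by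
    have := List.length_pos_iff.mpr hk; exact_mod_cast this
  set k := vc.length with hkdef
  set rs := PySem.Int.mod n (k : Int) with hrs
  have h0 : 0 ≤ rs := PySem.Int.mod_nonneg n hkpos
  have hlt : rs < (k : Int) := PySem.Int.mod_lt n hkpos
  have hq := PySem.Int.floordiv_mul_add_mod n (k : Int)
  set q := PySem.Int.floordiv n (k : Int) with hqdef
  -- the target index
  have hidx : PySem.Int.mod ((t : Int) - n) (k : Int) =
      if t < rs.toNat then ((k : Int) - rs + t) else ((t : Int) - rs) := by
    split_ifs with hcase
    · exact pymod_eq_of _ _ _ hkpos (by omega) (by omega) ⟨-q - 1, by rw [← hq]; ring⟩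
    · exact pymod_eq_of _ _ _ hkpos (by omega) (by omega) ⟨-q, by rw [← hq]; ring⟩
  rw [hidx]
  have hlendrop : (vc.drop (k - rs.toNat)).length = rs.toNat := by
    simp [hkdef]; omega
  split_ifs with hcase
  · -- t indexes the drop part
    rw [List.getElem?_append_left (by omega), List.getElem?_drop,
        PySem.List.pyGetD_eq_getElem vc ' ' (by omega) (by omega),
        ← List.getElem?_eq_getElem (by omega)]
    congr 1
    omega
  · -- t indexes the take part
    rw [List.getElem?_append_right (by omega), hlendrop, List.getElem?_take,
        if_pos (by omega), PySem.List.pyGetD_eq_getElem vc ' ' (by omega) (by omega),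
        ← List.getElem?_eq_getElem (by omega)]
    congr 1
    omega

-- the streaming rebuild from any list satisfying the modular-index description IS B's build
theorem rebuild_eq_build (vc : List Char) (n : Int) (s : List Char) (j : Nat) (w : List Char)
    (hw : ∀ t : Nat, t < (s.filter (fun c => pvVowels.contains c)).length →
      w[t]? = some (PySem.List.pyGetD vc (PySem.Int.mod (((j : Int) + t) - n) (vc.length : Int)) ' ')) :
    vsRebuild s w = vsBuild vc n s (j : Int) := by
  induction s generalizing j w with
  | nil => simp [vsRebuild, vsBuild]
  | cons c cs ih =>
    by_cases hc : pvVowels.contains c = true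
    · have hcB : pvVowelSetB.contains c = true := by rw [pvVowelSetB_eq]; exact hc
      have hlen : ((c :: cs).filter (fun c => pvVowels.contains c)).length =
          (cs.filter (fun c => pvVowels.contains c)).length + 1 := by
        rw [List.filter_cons_of_pos hc]; rfl
      cases w with
      | nil =>
        have := hw 0 (by omega)
        simp at this
      | cons v vt =>
        have hv := hw 0 (by omega)
        simp only [List.getElem?_cons_zero, Option.some.injEq] at hv
        simp only [vsRebuild, vsBuild]
        rw [if_pos hc, if_pos hcB]
        have hhead : v = PySem.List.pyGetD vc (PySem.Int.mod ((j : Int) - n) (vc.length : Int)) ' ' := by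
          rw [hv]; norm_num
        rw [hhead]
        congr 1
        have hcast : ((j : Int) + 1) = ((j + 1 : Nat) : Int) := by push_cast; ring
        rw [hcast]
        apply ih
        intro t htlt
        have ht1 := hw (t + 1) (by omega)
        simp only [List.getElem?_cons_succ] at ht1
        rw [ht1]
        congr 3
        push_cast; ring
    · have hcB : ¬ pvVowelSetB.contains c = true := by rw [pvVowelSetB_eq]; exact hc
      simp only [vsRebuild, vsBuild]
      rw [if_neg hc, if_neg hcB]
      congr 1
      apply ih
      intro t htlt
      apply hw
      rw [List.filter_cons_of_neg hc]
      omega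

-- ===== VERDICT (by name: the statements are the Claim_ definitions above) =====
theorem vowel_shift_spec : Claim_equal_vowel_shift := by
  intro some_string n _ hpre
  unfold Spec_vowel_shift vowel_shift vowel_shift_alt
  simp only []
  rw [filters_eq]
  set s := some_string.toList with hs
  set vc := s.filter (fun c => pvVowels.contains c) with hvc
  have hne : vc ≠ [] := by
    unfold Pre_vowel_shift at hpre
    simp only [List.any_eq_true] at hpre
    obtain ⟨c, hc, hv⟩ := hpre
    intro hnil
    have hmem : c ∈ vc := List.mem_filter.mpr ⟨hc, hv⟩
    rw [hnil] at hmem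
    exact List.not_mem_nil hmem
  rw [foldl_set_eq_rebuild, shifted_eq_drop_take vc n hne]
  congr 1
  apply rebuild_eq_build vc n s 0
  intro t htlt
  have hsg := shifted_getElem vc n hne t (by rw [hvc]; exact htlt)
  rw [hsg]
  congr 3
  push_cast; ring
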